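-- pv_equiv track=rewrite | github.com/seungriyou/algorithm-study | _Programmers-연습문제/lv3/Lv3-선입 선출 스케줄링.py | solution
-- ===== SOURCE A (Python) =====
-- def solution(n, cores):
--     """parametric search
--     ref: https://gkalstn000.github.io/2021/03/01/%EC%84%A0%EC%9E%85-%EC%84%A0%EC%B6%9C-%EC%8A%A4%EC%BC%80%EC%A4%84%EB%A7%81/
--
--     시간 별로 각 core에서 처리되는 작업의 개수는 각각 다음과 같으며, t(h)까지 처리되는 작업의 총 개수를 수식으로 구할 수 있다.
--
--     cores   |   1   |   2   |   3
--     -------- ------- ------- -------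
--     0(h)    |   1   |   1   |   1
--     1(h)    |   1   |       |
--     2(h)    |   1   |   1   |
--     ...     |  ...  |  ...  |  ...
--     -------- ------- ------- -------
--     t(h) 총합| t/1+1 | t/2+1 | t/3+1
--     """
--
--     # 코어의 개수
--     m = len(cores)
--
--     # 작업의 개수가 코어의 개수보다 같거나 작으면 n 반환
--     if n <= m:
--         return n
--
--     # 작업의 개수가 코어의 개수보다 크면 n에서 m만큼 빼기 (t(h)에서 +1 부분 미리 제외)
--     n -= m
--
--     # 이분탐색을 통해 마지막 작업까지 모두 완료되는 데까지 필요한 시간 time 구하기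
--     lo, hi = min(cores) * n // m, max(cores) * n // m
--     time = 0
--
--     def get_done_tasks(time):
--         return sum(time // core for core in cores)
--
--     while lo <= hi:
--         mid = (lo + hi) // 2
--
--         if get_done_tasks(mid) >= n:
--             time = mid
--             hi = mid - 1
--         else:
--             lo = mid + 1
--
--     # time - 1 시간 까지는 모든 core에서 작업 진행
--     n -= sum((time - 1) // core for core in cores)
--
--     # time 시간에서는 마지막 작업이 진행되는 core 번호를 찾기
--     for i, core in enumerate(cores, start=1):
--         # time 시간에 core에서 작업을 수행할 수 있다면 n--
--         if time % core == 0: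
--             n -= 1
--         # n == 0이라면 종료
--         if not n:
--             return i
-- ===== SOURCE B (Python) =====
-- def solution(n, cores):
--     m = len(cores)
--     if n <= m:
--         return n
--     k = n - m
--     # Quickselect over the m implicit streams of finish times {c, 2c, 3c, ...}:
--     # stream i's candidates are its multiples with index in (skip[i], cap[i]];
--     # probe a middle multiple of the widest stream and either discard every
--     # finish time <= probe (all among the k smallest) or drop every candidate
--     # above it, until each stream holds at most one candidate.
--     skip = [0] * m
--     hi0 = max(cores) * k
--     cap = [hi0 // c for c in cores]
--     while True:
--         j = 0
--         for i in range(1, m):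
--             if cap[i] - skip[i] > cap[j] - skip[j]:
--                 j = i
--         if cap[j] - skip[j] < 2:
--             break
--         p = cores[j] * (skip[j] + (cap[j] - skip[j]) // 2)
--         if sum(p // c for c in cores) < k:
--             skip = [p // c for c in cores]
--         else:
--             cap = [p // c for c in cores]
--     # Event-driven m-way merge of the surviving candidates: hand each remaining
--     # job to the earliest-free lowest-index core; the core taking the last job
--     # (the k-th overall) is the answer.
--     nxt = [c * (s + 1) for c, s in zip(cores, skip)]
--     rem = k - sum(skip)
--     while rem > 1:
--         best = 0
--         for i in range(1, m):
--             if nxt[i] < nxt[best]: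
--                 best = i
--         nxt[best] += cores[best]
--         rem -= 1
--     best = 0
--     for i in range(1, m):
--         if nxt[i] < nxt[best]:
--             best = i
--     return best + 1
-- ===== Notes on version B (the rewrite author's own statement) =====
-- stated objective: alternative
-- what changed: A binary-searches the completion time over a lo/hi interval and then finds the core by a decrementing in-order divisor scan; B runs a quickselect over the m implicit streams of finish times (per-stream candidate index windows, narrowed by probing a middle multiple of the widest stream) and then an event-driven m-way merge that hands each surviving job to the earliest-free lowest-index core, returning the core that takes the last job.
-- outside the precondition, e.g. on solution(5, [-3, 2, -4]): A returns 3, B returns 1; on solution(5, [2, 2]): A returns None, B returns 1; on solution(5, [5, 4, 4, 6]): A returns None, B returns 2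
import Mathlib
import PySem

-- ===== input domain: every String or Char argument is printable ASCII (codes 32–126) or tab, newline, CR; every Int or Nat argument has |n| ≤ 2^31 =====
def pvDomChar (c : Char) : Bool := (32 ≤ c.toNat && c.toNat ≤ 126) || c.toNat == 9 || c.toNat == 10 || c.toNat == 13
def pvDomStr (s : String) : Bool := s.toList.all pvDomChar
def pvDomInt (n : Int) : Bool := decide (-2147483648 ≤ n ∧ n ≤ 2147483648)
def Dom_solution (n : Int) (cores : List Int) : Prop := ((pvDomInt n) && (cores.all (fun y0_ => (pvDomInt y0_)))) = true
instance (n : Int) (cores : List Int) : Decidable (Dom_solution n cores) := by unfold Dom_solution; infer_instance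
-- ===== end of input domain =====

-- B replaces A's lo/hi binary search on the completion time + decrementing divisor
-- scan by a quickselect over the m implicit streams of finish times (per-stream
-- candidate index windows) followed by an event-driven m-way merge of the surviving
-- candidates — objective: alternative (similar cost, different algorithm).

-- ===== PORT A =====
-- sum(time // core for core in cores)
def doneA (cores : List Int) (time : Int) : Int :=
  (cores.map (fun core => PySem.Int.floordiv time core)).sum

-- while lo <= hi: mid = (lo+hi)//2; if done(mid) >= n: time = mid; hi = mid-1 else lo = mid+1
def bsearchA (cores : List Int) (target lo hi time : Int) : Int :=
  if h : lo ≤ hi then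
    let mid := PySem.Int.floordiv (lo + hi) 2
    if target ≤ doneA cores mid then bsearchA cores target lo (mid - 1) mid
    else bsearchA cores target (mid + 1) hi time
  else time
termination_by (hi + 1 - lo).toNat
decreasing_by
  · have := PySem.Int.floordiv_two_mid_bounds (lo := lo) (hi := hi) h; omega
  · have := PySem.Int.floordiv_two_mid_bounds (lo := lo) (hi := hi) h; omega

-- for i, core in enumerate(cores, start=1): if time % core == 0: n -= 1; if not n: return i
-- (Python falls off the end returning None there; that is outside Pre_, the port returns 0)
def scanA (time : Int) : List Int → Int → Int → Int
  | [], _, _ => 0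
  | core :: rest, i, nn =>
    let nn' := if PySem.Int.mod time core = 0 then nn - 1 else nn
    if nn' = 0 then i else scanA time rest (i + 1) nn'

def solution (n : Int) (cores : List Int) : Int :=
  let m : Int := cores.length
  if n ≤ m then n
  else
    let n1 := n - m
    match PySem.List.min? cores (fun x => x), PySem.List.max? cores (fun x => x) with
    | some mn, some mx =>
      let lo := PySem.Int.floordiv (mn * n1) m
      let hi := PySem.Int.floordiv (mx * n1) m
      let time := bsearchA cores n1 lo hi 0
      let n2 := n1 - doneA cores (time - 1)
      scanA time cores 1 n2
    | _, _ => 0   -- min()/max() of an empty list raise: outside Pre_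

-- ===== PORT B =====
-- best = 0; for i in range(1, m): if nxt[i] < nxt[best]: best = i
def argminB : List Int → Nat → Int → Nat → Nat
  | [], _, _, best => best
  | x :: rest, i, bv, best =>
    if x < bv then argminB rest (i + 1) x i else argminB rest (i + 1) bv best

def bestIdx (nxt : List Int) : Nat :=
  match nxt with
  | [] => 0            -- empty cores: outside Pre_
  | v :: rest => argminB rest 1 v 0

-- sum(p // c for c in cores)
def sumDivB (cores : List Int) (t : Int) : Int :=
  (cores.map (fun c => PySem.Int.floordiv t c)).sum

-- j = 0; for i in range(1, m): if cap[i]-skip[i] > cap[j]-skip[j]: j = i   (on w = cap - skip)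
def argmaxB : List Int → Nat → Int → Nat → Nat
  | [], _, _, j => j
  | x :: rest, i, bv, j =>
    if bv < x then argmaxB rest (i + 1) x i else argmaxB rest (i + 1) bv j

def worstIdx (w : List Int) : Nat :=
  match w with
  | [] => 0
  | v :: rest => argmaxB rest 1 v 0

-- the quickselect loop; fuel only makes the recursion total (it is set to the total
-- candidate count, which the loop strictly shrinks every round on Pre_ inputs)
def selectB (cores : List Int) (k : Int) : Nat → List Int → List Int → List Int
  | 0, skip, _ => skip
  | fuel + 1, skip, cap =>
    let w := List.zipWith (fun a b => a - b) cap skip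
    let j := worstIdx w
    if w.getD j 0 < 2 then skip
    else
      let p := cores.getD j 0 * (skip.getD j 0 + PySem.Int.floordiv (w.getD j 0) 2)
      if sumDivB cores p < k then
        selectB cores k fuel (cores.map (fun c => PySem.Int.floordiv p c)) cap
      else
        selectB cores k fuel skip (cores.map (fun c => PySem.Int.floordiv p c))

-- while rem > 1: best = argmin; nxt[best] += cores[best]; rem -= 1; then final argmin
def mergeB (cores nxt : List Int) (rem : Int) : Int :=
  if _h : 1 < rem then
    let best := bestIdx nxt
    mergeB cores (nxt.set best (nxt.getD best 0 + cores.getD best 0)) (rem - 1)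
  else (bestIdx nxt : Int) + 1
termination_by rem.toNat
decreasing_by omega

def solution_alt (n : Int) (cores : List Int) : Int :=
  let m : Int := cores.length
  if n ≤ m then n
  else
    let k := n - m
    match PySem.List.max? cores (fun x => x) with
    | some mx =>
      let hi0 := mx * k
      let skip0 := cores.map (fun _ => (0 : Int))
      let cap0 := cores.map (fun c => PySem.Int.floordiv hi0 c)
      let fuel := (sumDivB cores hi0).toNat + 1
      let skip := selectB cores k fuel skip0 cap0
      let nxt := List.zipWith (fun c s => c * (s + 1)) cores skip
      let rem := k - skip.sum
      mergeB cores nxt rem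
    | none => 0   -- max() of an empty list raises: outside Pre_

-- ===== PRECONDITION & SPEC =====
-- Pre_ excludes inputs where A does not return an int: with n > len(cores) it excludes cores
-- containing a value < 1 (A divides by them: ZeroDivisionError, or accidental floor-division
-- values / None), and all-positive cores whose binary-search upper bound max(cores)*(n-m)//len(cores)
-- undershoots the completion time, on which A's scan falls off the end and returns None.
def Pre_solution (n : Int) (cores : List Int) : Prop :=
  n ≤ cores.length ∨
  (cores ≠ [] ∧ (∀ c ∈ cores, 1 ≤ c) ∧
    ∃ mx ∈ cores, (∀ c ∈ cores, c ≤ mx) ∧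
      n - cores.length ≤ (cores.map (fun c =>
        PySem.Int.floordiv (PySem.Int.floordiv (mx * (n - cores.length)) cores.length) c)).sum)

instance (n : Int) (cores : List Int) : Decidable (Pre_solution n cores) := by
  unfold Pre_solution; infer_instance

def pvWitness_solution : Int × List Int := (5, [1, 2])

def Spec_solution (n : Int) (cores : List Int) (out : Int) : Prop := out = solution_alt n cores
instance (n : Int) (cores : List Int) (out : Int) : Decidable (Spec_solution n cores out) := by unfold Spec_solution; infer_instance

-- ===== CLAIM (what is proved, stated in full; the proofs are below) =====
def Claim_equal_solution : Prop := ∀ (n : Int) (cores : List Int), Dom_solution n cores → Pre_solution n cores → Spec_solution n cores (solution n cores)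

-- ===== LEMMAS AND PROOFS =====

-- [i for ...]: 1-based indices of cores finishing a job at `time` (proof-side device)
def divIdxsB (time : Int) : List Int → Int → List Int
  | [], _ => []
  | c :: rest, i =>
    if PySem.Int.mod time c = 0 then i :: divIdxsB time rest (i + 1)
    else divIdxsB time rest (i + 1)

theorem doneA_mono (cores : List Int) (h1 : ∀ c ∈ cores, 1 ≤ c) {t t' : Int} (h : t ≤ t') :
    doneA cores t ≤ doneA cores t' := by
  unfold doneA
  apply List.sum_le_sum
  intro c hc
  have hc1 := h1 c hc
  rw [PySem.Int.floordiv_eq_ediv_of_pos (by omega), PySem.Int.floordiv_eq_ediv_of_pos (by omega)]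
  exact Int.ediv_le_ediv (by omega) h

theorem doneA_nonpos (cores : List Int) (h1 : ∀ c ∈ cores, 1 ≤ c) {t : Int} (h : t ≤ 0) :
    doneA cores t ≤ 0 := by
  unfold doneA
  calc (cores.map (fun core => PySem.Int.floordiv t core)).sum
      ≤ (cores.map (fun _ => (0:Int))).sum := by
        apply List.sum_le_sum
        intro c hc
        have hc1 := h1 c hc
        rw [PySem.Int.floordiv_eq_ediv_of_pos (by omega)]
        have := Int.ediv_le_ediv (show (0:Int) < c by omega) h
        simpa using this
    _ = 0 := by rw [PySem.List.sum_map_const_int]; ring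

theorem bsearchA_eq (cores : List Int) (target ts : Int)
    (h1 : ∀ c ∈ cores, 1 ≤ c)
    (hts : target ≤ doneA cores ts)
    (hmin : ∀ u, u < ts → doneA cores u < target) :
    ∀ lo hi acc, lo ≤ ts → (ts ≤ hi ∨ acc = ts) → bsearchA cores target lo hi acc = ts := by
  intro lo hi acc
  fun_induction bsearchA cores target lo hi acc with
  | case1 lo hi acc hle mid hge ih =>
    intro hlo hdisj
    have hmid := PySem.Int.floordiv_two_mid_bounds (lo := lo) (hi := hi) hle
    have hts_mid : ts ≤ mid := by
      by_contra hc
      exact absurd (hmin mid (by omega)) (by omega)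
    exact ih hlo (by omega)
  | case2 lo hi acc hle mid hge ih =>
    intro hlo hdisj
    have hmid := PySem.Int.floordiv_two_mid_bounds (lo := lo) (hi := hi) hle
    have hmid_ts : mid < ts := by
      by_contra hc
      have := doneA_mono cores h1 (show ts ≤ mid by omega)
      omega
    refine ih (by omega) ?_
    rcases hdisj with h | h
    · exact Or.inl h
    · exact Or.inr h
  | case3 lo hi acc hle =>
    intro hlo hdisj
    rcases hdisj with h | h
    · omega
    · exact h

theorem doneA_lo_pred (cores : List Int) (target mn : Int) (h1 : ∀ c ∈ cores, 1 ≤ c)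
    (hmem : mn ∈ cores) (hmn : ∀ c ∈ cores, mn ≤ c) (ht : 1 ≤ target) :
    doneA cores (PySem.Int.floordiv (mn * target) cores.length - 1) < target := by
  have hmn1 : (1:Int) ≤ mn := h1 mn hmem
  have hm : (0:Int) < cores.length := by
    have := List.length_pos_of_mem hmem
    exact_mod_cast this
  set m : Int := (cores.length : Int) with hmdef
  set a : Int := PySem.Int.floordiv (mn * target) m - 1 with hadef
  by_cases ha : a < 0
  · have := doneA_nonpos cores h1 (show a ≤ 0 by omega)
    omega
  · rw [not_lt] at ha
    set q : Int := PySem.Int.floordiv a mn with hqdef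
    have hq0 : 0 ≤ q := by
      rw [hqdef]
      rw [PySem.Int.le_floordiv_iff_mul_le (by omega)]
      omega
    have hqa : q * mn ≤ a := (PySem.Int.le_floordiv_iff_mul_le (by omega)).mp le_rfl
    have haq : a < (q + 1) * mn :=
      (PySem.Int.floordiv_lt_iff_lt_mul (by omega)).mp (by omega)
    have hstep1 : ∀ c ∈ cores, PySem.Int.floordiv a c ≤ q := by
      intro c hc
      have hc1 := h1 c hc
      have hmc := hmn c hc
      have hlt : a < (q + 1) * c :=
        lt_of_lt_of_le haq (mul_le_mul_of_nonneg_left hmc (by omega))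
      have := (PySem.Int.floordiv_lt_iff_lt_mul (show (0:Int) < c by omega)).mpr hlt
      omega
    have hsum : doneA cores a ≤ m * q := by
      unfold doneA
      calc (cores.map (fun core => PySem.Int.floordiv a core)).sum
          ≤ (cores.map (fun _ => q)).sum := List.sum_le_sum (by intro c hc; exact hstep1 c hc)
        _ = m * q := PySem.List.sum_map_const_int cores q
    have hlo : (a + 1) * m ≤ mn * target := by
      have : a + 1 ≤ PySem.Int.floordiv (mn * target) m := by omega
      exact (PySem.Int.le_floordiv_iff_mul_le (by omega)).mp this
    have hfin : m * q < target := by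
      have h2 : mn * (m * q) ≤ a * m := by
        calc mn * (m * q) = (q * mn) * m := by ring
          _ ≤ a * m := mul_le_mul_of_nonneg_right hqa (by omega)
      have h3 : a * m < (a + 1) * m := by
        have : (a + 1) * m = a * m + m := by ring
        omega
      have h4 : mn * (m * q) < mn * target := by omega
      exact lt_of_mul_lt_mul_left h4 (by omega)
    omega

theorem floordiv_pred (time c : Int) (hc : 1 ≤ c) :
    PySem.Int.floordiv time c - PySem.Int.floordiv (time - 1) c =
      if PySem.Int.mod time c = 0 then 1 else 0 := by
  set q : Int := PySem.Int.floordiv time c with hqdef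
  set r : Int := PySem.Int.mod time c with hrdef
  have hqr : q * c + r = time := PySem.Int.floordiv_mul_add_mod time c
  have hr0 : 0 ≤ r := PySem.Int.mod_nonneg time (by omega)
  have hrc : r < c := PySem.Int.mod_lt time (by omega)
  by_cases hr : r = 0
  · have hpred : PySem.Int.floordiv (time - 1) c = q - 1 := by
      rw [PySem.Int.floordiv_eq_iff_of_pos (by omega)]
      have e1 : (q - 1) * c = q * c - c := by ring
      have e2 : (q - 1 + 1) * c = q * c := by ring
      omega
    rw [if_pos hr, hpred]
    omega
  · have hpred : PySem.Int.floordiv (time - 1) c = q := by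
      rw [PySem.Int.floordiv_eq_iff_of_pos (by omega)]
      have e2 : (q + 1) * c = q * c + c := by ring
      omega
    rw [if_neg hr, hpred]
    omega

theorem doneA_cons (c : Int) (rest : List Int) (t : Int) :
    doneA (c :: rest) t = PySem.Int.floordiv t c + doneA rest t := by
  simp [doneA]

theorem doneA_step (time : Int) (cores : List Int) (h1 : ∀ c ∈ cores, 1 ≤ c) (i : Int) :
    doneA cores time - doneA cores (time - 1) = ((divIdxsB time cores i).length : Int) := by
  induction cores generalizing i with
  | nil => simp [doneA, divIdxsB]
  | cons c rest ih =>
    have hc := h1 c List.mem_cons_self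
    have hrest : ∀ x ∈ rest, (1:Int) ≤ x := fun x hx => h1 x (List.mem_cons_of_mem _ hx)
    have hkey := floordiv_pred time c hc
    have hih := ih hrest (i + 1)
    rw [doneA_cons, doneA_cons]
    simp only [divIdxsB]
    split_ifs at hkey ⊢ with hmod
    · simp only [List.length_cons]
      push_cast
      omega
    · omega

theorem scanA_eq (time : Int) : ∀ (cores : List Int) (i nn : Int), 1 ≤ nn →
    nn ≤ ((divIdxsB time cores i).length : Int) →
    scanA time cores i nn = (PySem.List.pyGet? (divIdxsB time cores i) (nn - 1)).getD 0 := by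
  intro cores
  induction cores with
  | nil =>
    intro i nn h1 h2
    simp [divIdxsB] at h2
    omega
  | cons c rest ih =>
    intro i nn h1 h2
    simp only [scanA, divIdxsB] at *
    split_ifs at h2 ⊢ with hmod hz hz
    · have hnn : nn = 1 := by omega
      subst hnn
      simp
    · have hn2 : 2 ≤ nn := by omega
      have hlen : nn - 1 ≤ ((divIdxsB time rest (i + 1)).length : Int) := by
        simp only [List.length_cons] at h2
        push_cast at h2
        omega
      rw [ih (i + 1) (nn - 1) (by omega) hlen]
      rw [PySem.List.pyGet?_of_nonneg _ (show (0:Int) ≤ nn - 1 by omega),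
          PySem.List.pyGet?_of_nonneg _ (show (0:Int) ≤ nn - 1 - 1 by omega)]
      have htn : (nn - 1).toNat = (nn - 1 - 1).toNat + 1 := by omega
      rw [htn, List.getElem?_cons_succ]
    · omega
    · exact ih (i + 1) nn h1 h2


theorem getD_set (l : List Int) (b : Nat) (v : Int) (hb : b < l.length) (i : Nat) :
    (l.set b v).getD i 0 = if i = b then v else l.getD i 0 := by
  rw [List.getD_eq_getElem?_getD, List.getElem?_set]
  rcases eq_or_ne i b with h | h
  · subst h
    simp [hb]
  · simp [Ne.symm h, h, List.getD_eq_getElem?_getD]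

theorem argminB_go (nxt : List Int) : ∀ (rest : List Int) (i best : Nat),
    i + rest.length = nxt.length →
    (∀ k, k < rest.length → rest.getD k 0 = nxt.getD (i + k) 0) →
    best < i →
    (∀ j, j < i → nxt.getD best 0 ≤ nxt.getD j 0) →
    (∀ j, j < best → nxt.getD best 0 < nxt.getD j 0) →
    argminB rest i (nxt.getD best 0) best < nxt.length ∧
    (∀ j, j < nxt.length → nxt.getD (argminB rest i (nxt.getD best 0) best) 0 ≤ nxt.getD j 0) ∧
    (∀ j, j < argminB rest i (nxt.getD best 0) best →
      nxt.getD (argminB rest i (nxt.getD best 0) best) 0 < nxt.getD j 0) := by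
  intro rest
  induction rest with
  | nil =>
    intro i best hlen _ hbi hle hlt
    simp only [argminB]
    simp only [List.length_nil, Nat.add_zero] at hlen
    refine ⟨by omega, ?_, hlt⟩
    intro j hj
    exact hle j (by omega)
  | cons x rest ih =>
    intro i best hlen hk hbi hle hlt
    have hx : x = nxt.getD i 0 := by simpa using hk 0 (by simp)
    have hk' : ∀ k, k < rest.length → rest.getD k 0 = nxt.getD (i + 1 + k) 0 := by
      intro k hkk
      have := hk (k + 1) (by simp; omega)
      simpa [show i + (k + 1) = i + 1 + k by omega] using this
    simp only [argminB]
    split_ifs with hcmp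
    · rw [hx] at hcmp ⊢
      exact ih (i + 1) i (by simp at hlen ⊢; omega) hk' (by omega)
        (by
          intro j hj
          rcases Nat.lt_or_ge j i with hji | hji
          · exact le_of_lt (lt_of_lt_of_le hcmp (hle j hji))
          · have : j = i := by omega
            simp [this])
        (by
          intro j hj
          exact lt_of_lt_of_le hcmp (hle j hj))
    · rw [hx] at hcmp
      exact ih (i + 1) best (by simp at hlen ⊢; omega) hk' (by omega)
        (by
          intro j hj
          rcases Nat.lt_or_ge j i with hji | hji
          · exact hle j hji
          · have : j = i := by omega
            rw [this]
            omega)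
        hlt

theorem bestIdx_spec (nxt : List Int) (hne : nxt ≠ []) :
    bestIdx nxt < nxt.length ∧
    (∀ j, j < nxt.length → nxt.getD (bestIdx nxt) 0 ≤ nxt.getD j 0) ∧
    (∀ j, j < bestIdx nxt → nxt.getD (bestIdx nxt) 0 < nxt.getD j 0) := by
  match nxt with
  | [] => exact absurd rfl hne
  | v :: rest =>
    have hv : v = (v :: rest).getD 0 0 := rfl
    have := argminB_go (v :: rest) rest 1 0 (by simp; omega)
      (by intro k hkk; rw [Nat.add_comm]; simp)
      (by omega)
      (by intro j hj; interval_cases j <;> simp)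
      (by intro j hj; omega)
    simpa [bestIdx] using this

theorem doneA_range (cores : List Int) (t : Int) :
    doneA cores t = ∑ i ∈ Finset.range cores.length, PySem.Int.floordiv t (cores.getD i 0) := by
  induction cores with
  | nil => simp [doneA]
  | cons c rest ih =>
    rw [doneA_cons, ih]
    simp only [List.length_cons, Finset.sum_range_succ']
    simp [List.getD_cons_succ, add_comm]

theorem divIdxs_get (h : Int) : ∀ (l : List Int) (b : Nat) (s : Int), b < l.length →
    PySem.Int.mod h (l.getD b 0) = 0 →
    (divIdxsB h l s)[(l.take b).countP (fun c => decide (PySem.Int.mod h c = 0))]? =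
      some (s + (b : Int)) := by
  intro l
  induction l with
  | nil => intro b s hb; simp at hb
  | cons c rest ih =>
    intro b s hb hd
    cases b with
    | zero =>
      simp only [List.getD_cons_zero] at hd
      simp [divIdxsB, hd]
    | succ b =>
      simp only [List.getD_cons_succ] at hd
      have hb' : b < rest.length := by simp at hb; omega
      have hih := ih b (s + 1) hb' hd
      simp only [List.take_succ_cons, List.countP_cons]
      by_cases hdc : PySem.Int.mod h c = 0
      · simp only [divIdxsB, if_pos hdc, hdc, decide_true, if_pos]
        rw [List.getElem?_cons_succ]
        rw [hih]
        congr 1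
        push_cast
        ring
      · simp only [divIdxsB, hdc, decide_false, if_false, if_neg, Bool.false_eq_true, add_zero]
        rw [hih]
        congr 1
        push_cast
        ring

theorem count_take_eq (P : Int → Bool) : ∀ (b : Nat) (l : List Int), b ≤ l.length →
    (((l.take b).countP P : Nat) : Int) =
      ∑ i ∈ Finset.range b, (if P (l.getD i 0) then (1:Int) else 0) := by
  intro b
  induction b with
  | zero => intro l _; simp
  | succ b ih =>
    intro l hb
    have hbl : b < l.length := by omega
    rw [List.take_succ_eq_append_getElem hbl, List.countP_append, Finset.sum_range_succ,
      ← ih l (by omega), List.getD_eq_getElem l 0 hbl]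
    simp only [List.countP_cons, List.countP_nil]
    push_cast
    split_ifs <;> simp


theorem floordiv_succ_self (a c : Int) (hc : 0 < c) :
    PySem.Int.floordiv (a + c) c = PySem.Int.floordiv a c + 1 := by
  rw [PySem.Int.floordiv_eq_ediv_of_pos hc, PySem.Int.floordiv_eq_ediv_of_pos hc,
    show a + c = a + 1 * c by ring, Int.add_mul_ediv_right _ _ (by omega)]

-- The crux: from any reachable merge state, popping `k+1` more jobs ends at the core
-- holding the (target)-th event (time T, rank among divisors of T), i.e. A's answer.
theorem mergeB_eq (cores : List Int) (hpos : ∀ c ∈ cores, 1 ≤ c) (hne : cores ≠ [])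
    (target T : Int) (hT : target ≤ doneA cores T) (hTmin : ∀ u, u < T → doneA cores u < target) :
    ∀ (k : Nat) (nxt : List Int), nxt.length = cores.length →
    (∀ i, i < cores.length → cores.getD i 0 ∣ nxt.getD i 0 ∧ cores.getD i 0 ≤ nxt.getD i 0) →
    (∀ i, i < cores.length → ∀ j, j < cores.length →
      cores.getD i 0 ≤ nxt.getD i 0 - cores.getD i 0 →
      (nxt.getD i 0 - cores.getD i 0 < nxt.getD j 0 ∨
       (nxt.getD i 0 - cores.getD i 0 = nxt.getD j 0 ∧ i < j))) →
    target = ((k : Int) + 1) + (∑ i ∈ Finset.range cores.length,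
        PySem.Int.floordiv (nxt.getD i 0) (cores.getD i 0)) - cores.length →
    mergeB cores nxt ((k : Int) + 1) =
      (PySem.List.pyGet? (divIdxsB T cores 1) (target - doneA cores (T - 1) - 1)).getD 0 := by
  intro k
  induction k with
  | zero =>
    intro nxt hlen hdvd hclos htar
    -- shared state facts
    have hm : 0 < cores.length := List.length_pos_iff.mpr hne
    have hcm : ∀ i, (hi : i < cores.length) → 1 ≤ cores.getD i 0 := by
      intro i hi
      have : cores.getD i 0 ∈ cores := by
        rw [List.getD_eq_getElem _ _ hi]; exact List.getElem_mem hi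
      exact hpos _ this
    have hne' : nxt ≠ [] := by
      intro hc; rw [hc] at hlen; simp at hlen; omega
    obtain ⟨hb, hmin, hstrict⟩ := bestIdx_spec nxt hne'
    set b := bestIdx nxt with hbdef
    have hb' : b < cores.length := by omega
    set h0 := nxt.getD b 0 with h0def
    have hcb := hcm b hb'
    have hF0 : 1 ≤ h0 := le_trans hcb (hdvd b hb').2
    have hki_mul : ∀ i, i < cores.length →
        PySem.Int.floordiv (nxt.getD i 0) (cores.getD i 0) * cores.getD i 0 = nxt.getD i 0 := by
      intro i hi
      rw [PySem.Int.floordiv_eq_ediv_of_pos (by have := hcm i hi; omega)]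
      exact Int.ediv_mul_cancel (hdvd i hi).1
    have hF1 : ∀ i, i < cores.length →
        PySem.Int.floordiv (h0 - 1) (cores.getD i 0) ≤
          PySem.Int.floordiv (nxt.getD i 0) (cores.getD i 0) - 1 := by
      intro i hi
      have hc := hcm i hi
      have hge : h0 ≤ nxt.getD i 0 := hmin i (by omega)
      have := (PySem.Int.floordiv_lt_iff_lt_mul (a := h0 - 1) (b := cores.getD i 0)
        (q := PySem.Int.floordiv (nxt.getD i 0) (cores.getD i 0)) (by omega)).mpr
        (by rw [hki_mul i hi]; omega)
      omega
    have hF2 : ∀ i, i < cores.length →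
        PySem.Int.floordiv (nxt.getD i 0) (cores.getD i 0) - 1 ≤
          PySem.Int.floordiv h0 (cores.getD i 0) := by
      intro i hi
      have hc := hcm i hi
      by_cases hk1 : PySem.Int.floordiv (nxt.getD i 0) (cores.getD i 0) ≤ 1
      · have : 0 ≤ PySem.Int.floordiv h0 (cores.getD i 0) :=
          (PySem.Int.le_floordiv_iff_mul_le (by omega)).mpr (by omega)
        omega
      · have hguard : cores.getD i 0 ≤ nxt.getD i 0 - cores.getD i 0 := by
          have h2 : 2 * cores.getD i 0 ≤
              PySem.Int.floordiv (nxt.getD i 0) (cores.getD i 0) * cores.getD i 0 :=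
            mul_le_mul_of_nonneg_right (by omega) (by omega)
          rw [hki_mul i hi] at h2
          omega
        have hle : nxt.getD i 0 - cores.getD i 0 ≤ h0 := by
          rcases hclos i hi b hb' hguard with h | h
          · omega
          · omega
        refine (PySem.Int.le_floordiv_iff_mul_le (by omega)).mpr ?_
        have : (PySem.Int.floordiv (nxt.getD i 0) (cores.getD i 0) - 1) * cores.getD i 0 =
            nxt.getD i 0 - cores.getD i 0 := by
          rw [sub_mul, one_mul, hki_mul i hi]
        omega
    have hdiff : ∀ i, i < cores.length →
        PySem.Int.floordiv (nxt.getD i 0) (cores.getD i 0) - 1 -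
          PySem.Int.floordiv (h0 - 1) (cores.getD i 0) =
        if PySem.Int.mod h0 (cores.getD i 0) = 0 ∧ i < b then 1 else 0 := by
      intro i hi
      have hc := hcm i hi
      have hpred := floordiv_pred h0 (cores.getD i 0) hc
      by_cases hd : PySem.Int.mod h0 (cores.getD i 0) = 0
      · rw [if_pos hd] at hpred
        have hq_mul : PySem.Int.floordiv h0 (cores.getD i 0) * cores.getD i 0 = h0 := by
          rw [PySem.Int.floordiv_eq_ediv_of_pos (by omega)]
          exact Int.ediv_mul_cancel ((PySem.Int.mod_eq_zero_iff_dvd _ _).mp hd)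
        have hq1 : 1 ≤ PySem.Int.floordiv h0 (cores.getD i 0) := by
          by_contra hcq
          have : PySem.Int.floordiv h0 (cores.getD i 0) * cores.getD i 0 ≤ 0 :=
            mul_nonpos_of_nonpos_of_nonneg (by omega) (by omega)
          omega
        have hge : h0 ≤ nxt.getD i 0 := hmin i (by omega)
        have hkq : PySem.Int.floordiv h0 (cores.getD i 0) ≤
            PySem.Int.floordiv (nxt.getD i 0) (cores.getD i 0) := by
          have := hki_mul i hi
          nlinarith [hq_mul]
        rcases eq_or_ne (nxt.getD i 0) h0 with heq | hneq
        · -- head equals h0: its event at h0 is the head, not popped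
          have hkeq : PySem.Int.floordiv (nxt.getD i 0) (cores.getD i 0) =
              PySem.Int.floordiv h0 (cores.getD i 0) := by rw [heq]
          have hnotlt : ¬ i < b := by
            intro hlt
            have := hstrict i hlt
            omega
          rw [if_neg (by tauto)]
          omega
        · -- head strictly above h0: the popped event at h0 forces i < b by the closure
          have hgt : h0 < nxt.getD i 0 := by
            have := hmin i (by omega); omega
          have hklt : PySem.Int.floordiv h0 (cores.getD i 0) <
              PySem.Int.floordiv (nxt.getD i 0) (cores.getD i 0) := by
            have := hki_mul i hi
            nlinarith [hq_mul]
          have hguard : cores.getD i 0 ≤ nxt.getD i 0 - cores.getD i 0 := by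
            have h2 : (PySem.Int.floordiv h0 (cores.getD i 0) + 1) * cores.getD i 0 ≤
                PySem.Int.floordiv (nxt.getD i 0) (cores.getD i 0) * cores.getD i 0 :=
              mul_le_mul_of_nonneg_right (by omega) (by omega)
            rw [hki_mul i hi] at h2
            nlinarith [hq_mul]
          rcases hclos i hi b hb' hguard with hcl | hcl
          · -- impossible: the max popped event of i is ≥ h0
            exfalso
            have : h0 ≤ nxt.getD i 0 - cores.getD i 0 := by
              have h2 : (PySem.Int.floordiv h0 (cores.getD i 0) + 1) * cores.getD i 0 ≤
                  PySem.Int.floordiv (nxt.getD i 0) (cores.getD i 0) * cores.getD i 0 :=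
                mul_le_mul_of_nonneg_right (by omega) (by omega)
              rw [hki_mul i hi] at h2
              nlinarith [hq_mul]
            omega
          · have hkq1 : PySem.Int.floordiv (nxt.getD i 0) (cores.getD i 0) - 1 =
                PySem.Int.floordiv h0 (cores.getD i 0) := by
              have he : (PySem.Int.floordiv (nxt.getD i 0) (cores.getD i 0) - 1) *
                  cores.getD i 0 = nxt.getD i 0 - cores.getD i 0 := by
                rw [sub_mul, one_mul, hki_mul i hi]
              have : (PySem.Int.floordiv (nxt.getD i 0) (cores.getD i 0) - 1) *
                  cores.getD i 0 = PySem.Int.floordiv h0 (cores.getD i 0) * cores.getD i 0 := by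
                rw [he, hq_mul, hcl.1]
              exact mul_right_cancel₀ (by omega) this
            rw [if_pos ⟨hd, hcl.2⟩]
            omega
      · rw [if_neg hd] at hpred
        rw [if_neg (by tauto)]
        have := hF1 i hi
        have := hF2 i hi
        omega
    -- b's own head finishes at h0
    have hmodb : PySem.Int.mod h0 (cores.getD b 0) = 0 :=
      (PySem.Int.mod_eq_zero_iff_dvd _ _).mpr (hdvd b hb').1
    -- this pop is the target-th event: T = h0
    have hdone_pred : doneA cores (h0 - 1) ≤
        (∑ i ∈ Finset.range cores.length,
          PySem.Int.floordiv (nxt.getD i 0) (cores.getD i 0)) - cores.length := by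
      rw [doneA_range]
      have : ∀ i ∈ Finset.range cores.length,
          PySem.Int.floordiv (h0 - 1) (cores.getD i 0) ≤
            PySem.Int.floordiv (nxt.getD i 0) (cores.getD i 0) - 1 := by
        intro i hi
        exact hF1 i (Finset.mem_range.mp hi)
      calc (∑ i ∈ Finset.range cores.length, PySem.Int.floordiv (h0 - 1) (cores.getD i 0))
          ≤ ∑ i ∈ Finset.range cores.length,
              (PySem.Int.floordiv (nxt.getD i 0) (cores.getD i 0) - 1) :=
            Finset.sum_le_sum this
        _ = _ := by
            rw [Finset.sum_sub_distrib]
            simp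
    have hdone_ge : target ≤ doneA cores h0 := by
      rw [doneA_range]
      have hlt : (∑ i ∈ Finset.range cores.length,
          (PySem.Int.floordiv (nxt.getD i 0) (cores.getD i 0) - 1)) <
          ∑ i ∈ Finset.range cores.length, PySem.Int.floordiv h0 (cores.getD i 0) := by
        refine Finset.sum_lt_sum (fun i hi => ?_) ⟨b, Finset.mem_range.mpr hb', ?_⟩
        · have := hF2 i (Finset.mem_range.mp hi); omega
        · have : PySem.Int.floordiv h0 (cores.getD b 0) =
              PySem.Int.floordiv (nxt.getD b 0) (cores.getD b 0) := rfl
          omega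
      have he : (∑ i ∈ Finset.range cores.length,
          (PySem.Int.floordiv (nxt.getD i 0) (cores.getD i 0) - 1)) =
          (∑ i ∈ Finset.range cores.length,
            PySem.Int.floordiv (nxt.getD i 0) (cores.getD i 0)) - cores.length := by
        rw [Finset.sum_sub_distrib]
        simp
      omega
    have hTeq : T = h0 := by
      have h1 : T ≤ h0 := by
        by_contra hc
        have := hTmin h0 (by omega)
        omega
      have h2 : h0 ≤ T := by
        by_contra hc
        have := doneA_mono cores hpos (show T ≤ h0 - 1 by omega)
        have := hdone_pred
        omega
      omega
    -- the rank is the number of earlier cores also finishing at h0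
    have hrank : target - doneA cores (T - 1) - 1 =
        (((cores.take b).countP (fun c => decide (PySem.Int.mod h0 c = 0)) : Nat) : Int) := by
      rw [hTeq, count_take_eq _ b cores (by omega), doneA_range]
      have he1 : target - (∑ i ∈ Finset.range cores.length,
          PySem.Int.floordiv (h0 - 1) (cores.getD i 0)) - 1 =
          ∑ i ∈ Finset.range cores.length,
            (PySem.Int.floordiv (nxt.getD i 0) (cores.getD i 0) - 1 -
              PySem.Int.floordiv (h0 - 1) (cores.getD i 0)) := by
        rw [Finset.sum_sub_distrib, Finset.sum_sub_distrib]
        simp only [Finset.sum_const, Finset.card_range, nsmul_eq_mul, mul_one]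
        omega
      rw [he1]
      rw [Finset.sum_congr rfl (fun i hi => hdiff i (Finset.mem_range.mp hi))]
      have hsub : ∑ i ∈ Finset.range b,
          (if PySem.Int.mod h0 (cores.getD i 0) = 0 ∧ i < b then (1:Int) else 0) =
          ∑ i ∈ Finset.range cores.length,
            (if PySem.Int.mod h0 (cores.getD i 0) = 0 ∧ i < b then (1:Int) else 0) := by
        apply Finset.sum_subset (Finset.range_subset.mpr (fun x hx => Finset.mem_range.mpr (by omega)))
        intro x hx hnx
        simp only [Finset.mem_range] at hx hnx
        exact if_neg (fun hcon => hnx hcon.2)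
      rw [← hsub]
      apply Finset.sum_congr rfl
      intro i hi
      simp only [Finset.mem_range] at hi
      by_cases hd : PySem.Int.mod h0 (cores.getD i 0) = 0
      · simp [hd, hi]
      · have hd' : ¬ PySem.Int.mod h0 (cores[i]?.getD 0) = 0 := by
          simpa [List.getD_eq_getElem?_getD] using hd
        rw [if_neg (fun hcon => hd hcon.1)]
        simp [hd']
    -- evaluate one unfolding of mergeB and the indexed lookup
    have hr1 : ((0:Nat):Int) + 1 = 1 := by norm_num
    rw [hrank, hTeq]
    rw [PySem.List.pyGet?_of_nonneg _ (by positivity)]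
    rw [Int.toNat_natCast]
    rw [divIdxs_get h0 cores b 1 hb' hmodb]
    simp only [Option.getD_some]
    rw [hr1, mergeB, dif_neg (by norm_num : ¬ (1:Int) < 1)]
    omega
  | succ k ih =>
    intro nxt hlen hdvd hclos htar
    have hm : 0 < cores.length := List.length_pos_iff.mpr hne
    have hcm : ∀ i, (hi : i < cores.length) → 1 ≤ cores.getD i 0 := by
      intro i hi
      have : cores.getD i 0 ∈ cores := by
        rw [List.getD_eq_getElem _ _ hi]; exact List.getElem_mem hi
      exact hpos _ this
    have hne' : nxt ≠ [] := by
      intro hc; rw [hc] at hlen; simp at hlen; omega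
    obtain ⟨hb, hmin, hstrict⟩ := bestIdx_spec nxt hne'
    set b := bestIdx nxt with hbdef
    have hb' : b < cores.length := by omega
    set h0 := nxt.getD b 0 with h0def
    have hcb := hcm b hb'
    have hF0 : 1 ≤ h0 := le_trans hcb (hdvd b hb').2
    have hbn : b < nxt.length := by omega
    set nxt' := nxt.set b (nxt.getD b 0 + cores.getD b 0) with hnxt'
    have hget' : ∀ i : Nat, nxt'.getD i 0 =
        if i = b then nxt.getD b 0 + cores.getD b 0 else nxt.getD i 0 :=
      getD_set nxt b _ hbn
    have hlen' : nxt'.length = cores.length := by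
      rw [hnxt', List.length_set]; exact hlen
    have hdvd' : ∀ i, i < cores.length →
        cores.getD i 0 ∣ nxt'.getD i 0 ∧ cores.getD i 0 ≤ nxt'.getD i 0 := by
      intro i hi
      rw [hget' i]
      rcases eq_or_ne i b with h | h
      · rw [if_pos h, h]
        exact ⟨dvd_add (hdvd b hb').1 dvd_rfl, by have := (hdvd b hb').2; omega⟩
      · rw [if_neg h]
        exact hdvd i hi
    have hclos' : ∀ i, i < cores.length → ∀ j, j < cores.length →
        cores.getD i 0 ≤ nxt'.getD i 0 - cores.getD i 0 →
        (nxt'.getD i 0 - cores.getD i 0 < nxt'.getD j 0 ∨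
         (nxt'.getD i 0 - cores.getD i 0 = nxt'.getD j 0 ∧ i < j)) := by
      intro i hi j hj hguard
      rw [hget' i] at hguard ⊢
      rw [hget' j]
      rcases eq_or_ne i b with hib | hib
      · rw [hib] at hguard ⊢
        rw [if_pos rfl] at hguard ⊢
        have hval : nxt.getD b 0 + cores.getD b 0 - cores.getD b 0 = h0 := by omega
        rw [hval]
        rcases eq_or_ne j b with hjb | hjb
        · rw [hjb, if_pos rfl]
          left
          omega
        · rw [if_neg hjb]
          have hminj : h0 ≤ nxt.getD j 0 := hmin j (by omega)
          rcases eq_or_ne (nxt.getD j 0) h0 with hjh | hjh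
          · right
            refine ⟨by omega, ?_⟩
            have : ¬ j < b := fun hlt => absurd (hstrict j hlt) (by omega)
            omega
          · left
            omega
      · rw [if_neg hib] at hguard ⊢
        rcases eq_or_ne j b with hjb | hjb
        · rw [if_pos hjb]
          rcases hclos i hi b hb' hguard with h | h
          · left; omega
          · left; omega
        · rw [if_neg hjb]
          exact hclos i hi j hj hguard
    have hsum' : (∑ i ∈ Finset.range cores.length,
        PySem.Int.floordiv (nxt'.getD i 0) (cores.getD i 0)) =
        (∑ i ∈ Finset.range cores.length,
          PySem.Int.floordiv (nxt.getD i 0) (cores.getD i 0)) + 1 := by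
      have hpt : ∀ i ∈ Finset.range cores.length,
          PySem.Int.floordiv (nxt'.getD i 0) (cores.getD i 0) =
            PySem.Int.floordiv (nxt.getD i 0) (cores.getD i 0) +
              (if i = b then 1 else 0) := by
        intro i hi
        rw [hget' i]
        rcases eq_or_ne i b with h | h
        · subst h
          rw [if_pos rfl, if_pos rfl]
          exact floordiv_succ_self _ _ (by omega)
        · rw [if_neg h, if_neg h, add_zero]
      rw [Finset.sum_congr rfl hpt, Finset.sum_add_distrib]
      congr 1
      rw [Finset.sum_ite_eq' (Finset.range cores.length) b (fun _ => (1:Int))]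
      rw [if_pos (Finset.mem_range.mpr hb')]
    have htar' : target = ((k : Int) + 1) + (∑ i ∈ Finset.range cores.length,
        PySem.Int.floordiv (nxt'.getD i 0) (cores.getD i 0)) - cores.length := by
      rw [hsum']
      push_cast at htar ⊢
      omega
    have hstep : mergeB cores nxt (((k+1 : Nat) : Int) + 1) = mergeB cores nxt' ((k : Int) + 1) := by
      rw [mergeB]
      rw [dif_pos (by push_cast; omega : (1:Int) < ((k+1 : Nat) : Int) + 1)]
      have : ((k+1 : Nat) : Int) + 1 - 1 = (k : Int) + 1 := by push_cast; ring
      rw [this]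
    rw [hstep]
    exact ih nxt' hlen' hdvd' hclos' htar'


theorem doneA_U (cores : List Int) (target mx : Int) (h1 : ∀ c ∈ cores, 1 ≤ c)
    (hmem : mx ∈ cores) (ht : 1 ≤ target) : target ≤ doneA cores (mx * target) := by
  have hmx : (1:Int) ≤ mx := h1 mx hmem
  have hU : (0:Int) ≤ mx * target := by positivity
  unfold doneA
  have hterm : PySem.Int.floordiv (mx * target) mx = target := by
    rw [PySem.Int.floordiv_eq_ediv_of_pos (by omega)]
    exact Int.mul_ediv_cancel_left _ (by omega)
  calc target = PySem.Int.floordiv (mx * target) mx := hterm.symm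
    _ ≤ (cores.map (fun core => PySem.Int.floordiv (mx * target) core)).sum := by
        apply List.single_le_sum
        · intro x hx
          obtain ⟨c, hc, rfl⟩ := List.mem_map.mp hx
          have hc1 := h1 c hc
          rw [PySem.Int.floordiv_eq_ediv_of_pos (by omega)]
          exact Int.ediv_nonneg hU (by omega)
        · exact List.mem_map.mpr ⟨mx, hmem, rfl⟩

theorem getD_map_div (l : List Int) (t : Int) (i : Nat) (hi : i < l.length) :
    (l.map (fun c => PySem.Int.floordiv t c)).getD i 0 = PySem.Int.floordiv t (l.getD i 0) := by
  rw [List.getD_eq_getElem _ _ (by simpa using hi), List.getElem_map,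
    List.getD_eq_getElem _ _ hi]

theorem getD_zipWith (f : Int → Int → Int) (a b : List Int) (i : Nat)
    (ha : i < a.length) (hb : i < b.length) :
    (List.zipWith f a b).getD i 0 = f (a.getD i 0) (b.getD i 0) := by
  rw [List.getD_eq_getElem _ _ (by simp [List.length_zipWith]; omega), List.getElem_zipWith,
    List.getD_eq_getElem _ _ ha, List.getD_eq_getElem _ _ hb]

theorem argmaxB_lt : ∀ (rest : List Int) (i : Nat) (bv : Int) (j L : Nat),
    j < i → i + rest.length = L → argmaxB rest i bv j < L := by
  intro rest
  induction rest with
  | nil =>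
    intro i bv j L hj hL
    simp only [argmaxB]
    simp only [List.length_nil, Nat.add_zero] at hL
    omega
  | cons x r ih =>
    intro i bv j L hj hL
    simp only [argmaxB]
    split_ifs
    · exact ih (i + 1) x i L (by omega) (by simp at hL ⊢; omega)
    · exact ih (i + 1) bv j L (by omega) (by simp at hL ⊢; omega)

theorem worstIdx_lt (w : List Int) (hne : w ≠ []) : worstIdx w < w.length := by
  match w with
  | [] => exact absurd rfl hne
  | v :: rest => exact argmaxB_lt rest 1 v 0 _ (by omega) (by simp [Nat.add_comm])

-- quickselect invariant: both windows always come from a pair of time thresholds,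
-- and the lower threshold stays strictly below the target count
theorem selectB_inv (cores : List Int) (k : Int) (hne : cores ≠ [])
    (hpos : ∀ c ∈ cores, 1 ≤ c) :
    ∀ (fuel : Nat) (skip cap : List Int) (lo hi : Int),
    skip = cores.map (fun c => PySem.Int.floordiv lo c) →
    cap = cores.map (fun c => PySem.Int.floordiv hi c) →
    0 ≤ lo → lo ≤ hi → doneA cores lo < k → k ≤ doneA cores hi →
    ∃ t : Int, selectB cores k fuel skip cap = cores.map (fun c => PySem.Int.floordiv t c) ∧
      0 ≤ t ∧ doneA cores t < k := by
  intro fuel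
  induction fuel with
  | zero =>
    intro skip cap lo hi hs hc h0 hlohi hlt hge
    exact ⟨lo, by simp [selectB, hs], h0, hlt⟩
  | succ fuel ih =>
    intro skip cap lo hi hs hc h0 hlohi hlt hge
    have hm : 0 < cores.length := List.length_pos_iff.mpr hne
    have hcm : ∀ i, i < cores.length → 1 ≤ cores.getD i 0 := by
      intro i hi2
      have : cores.getD i 0 ∈ cores := by
        rw [List.getD_eq_getElem _ _ hi2]; exact List.getElem_mem hi2
      exact hpos _ this
    have hsl : skip.length = cores.length := by rw [hs]; simp
    have hcl : cap.length = cores.length := by rw [hc]; simp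
    have hwl : (List.zipWith (fun a b => a - b) cap skip).length = cores.length := by
      simp [List.length_zipWith, hsl, hcl]
    have hwne : List.zipWith (fun a b => a - b) cap skip ≠ [] := by
      intro h
      rw [h] at hwl
      simp at hwl
      omega
    have hjlt : worstIdx (List.zipWith (fun a b => a - b) cap skip) < cores.length := by
      have := worstIdx_lt _ hwne
      omega
    have hcj := hcm _ hjlt
    have hskipD : ∀ i, i < cores.length →
        skip.getD i 0 = PySem.Int.floordiv lo (cores.getD i 0) := by
      intro i hi2
      rw [hs, getD_map_div _ _ _ hi2]
    have hcapD : ∀ i, i < cores.length →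
        cap.getD i 0 = PySem.Int.floordiv hi (cores.getD i 0) := by
      intro i hi2
      rw [hc, getD_map_div _ _ _ hi2]
    have hwj : (List.zipWith (fun a b => a - b) cap skip).getD
        (worstIdx (List.zipWith (fun a b => a - b) cap skip)) 0 =
        PySem.Int.floordiv hi (cores.getD (worstIdx (List.zipWith (fun a b => a - b) cap skip)) 0) -
        PySem.Int.floordiv lo (cores.getD (worstIdx (List.zipWith (fun a b => a - b) cap skip)) 0) := by
      rw [getD_zipWith _ _ _ _ (by omega) (by omega), hskipD _ hjlt, hcapD _ hjlt]
    have hsj : skip.getD (worstIdx (List.zipWith (fun a b => a - b) cap skip)) 0 =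
        PySem.Int.floordiv lo (cores.getD (worstIdx (List.zipWith (fun a b => a - b) cap skip)) 0) :=
      hskipD _ hjlt
    simp only [selectB]
    by_cases hend : (List.zipWith (fun a b => a - b) cap skip).getD
        (worstIdx (List.zipWith (fun a b => a - b) cap skip)) 0 < 2
    · rw [if_pos hend]
      exact ⟨lo, hs, h0, hlt⟩
    · rw [if_neg hend]
      rw [hwj] at hend
      rw [hwj, hsj]
      set cj := cores.getD (worstIdx (List.zipWith (fun a b => a - b) cap skip)) 0 with hcjdef
      set s := PySem.Int.floordiv lo cj with hsdef
      set u := PySem.Int.floordiv hi cj with hudef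
      set d := PySem.Int.floordiv (u - s) 2 with hddef
      have hd1 : 1 ≤ d := (PySem.Int.le_floordiv_iff_mul_le (by norm_num)).mpr (by omega)
      have hdlt : d ≤ u - s - 1 := by
        have := (PySem.Int.floordiv_lt_iff_lt_mul (a := u - s) (b := 2) (q := u - s) (by norm_num)).mpr (by omega)
        omega
      have hlop : lo < cj * (s + d) := by
        have h1' : lo < (s + 1) * cj :=
          (PySem.Int.floordiv_lt_iff_lt_mul (by omega)).mp (by omega)
        have h2' : (s + 1) * cj ≤ (s + d) * cj :=
          mul_le_mul_of_nonneg_right (by omega) (by omega)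
        nlinarith
      have hph : cj * (s + d) < hi := by
        have h1' : u * cj ≤ hi := (PySem.Int.le_floordiv_iff_mul_le (by omega)).mp le_rfl
        have h2' : (s + d) * cj ≤ (u - 1) * cj :=
          mul_le_mul_of_nonneg_right (by omega) (by omega)
        nlinarith
      have hsd : sumDivB cores (cj * (s + d)) = doneA cores (cj * (s + d)) := rfl
      by_cases hbr : sumDivB cores (cj * (s + d)) < k
      · rw [if_pos hbr]
        exact ih (cores.map (fun c => PySem.Int.floordiv (cj * (s + d)) c)) cap
          (cj * (s + d)) hi rfl hc (by omega) (by omega) (by omega) hge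
      · rw [if_neg hbr]
        exact ih skip (cores.map (fun c => PySem.Int.floordiv (cj * (s + d)) c))
          lo (cj * (s + d)) hs rfl h0 (by omega) hlt (by omega)

-- ===== VERDICT (by name: the statement is the Claim_ definition above) =====
theorem solution_spec : Claim_equal_solution := by
  intro n cores _ hpre
  unfold Spec_solution
  by_cases hnm : n ≤ (cores.length : Int)
  · unfold solution solution_alt
    simp only [if_pos hnm]
  · have hpre' : cores ≠ [] ∧ (∀ c ∈ cores, 1 ≤ c) ∧
        ∃ mx ∈ cores, (∀ c ∈ cores, c ≤ mx) ∧
          n - cores.length ≤ (cores.map (fun c =>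
            PySem.Int.floordiv (PySem.Int.floordiv (mx * (n - cores.length)) cores.length) c)).sum := by
      rcases hpre with h | h
      · exact absurd h hnm
      · exact h
    obtain ⟨hne, h1, mx', hmx'mem, hmx'max, hsum⟩ := hpre'
    obtain ⟨mn, hmin⟩ : ∃ mn, PySem.List.min? cores (fun x => x) = some mn := by
      cases h : PySem.List.min? cores (fun x => x) with
      | none => exact absurd ((PySem.List.min?_eq_none_iff _ _).mp h) hne
      | some mn => exact ⟨mn, rfl⟩
    obtain ⟨mx, hmax⟩ : ∃ mx, PySem.List.max? cores (fun x => x) = some mx := by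
      cases h : PySem.List.max? cores (fun x => x) with
      | none => exact absurd ((PySem.List.max?_eq_none_iff _ _).mp h) hne
      | some mx => exact ⟨mx, rfl⟩
    have hmxmem := PySem.List.max?_mem hmax
    have hmxmax : ∀ c ∈ cores, c ≤ mx := fun c hc => PySem.List.max?_isMax hmax c hc
    have hmnmem := PySem.List.min?_mem hmin
    have hmnmin : ∀ c ∈ cores, mn ≤ c := fun c hc => PySem.List.min?_isMin hmin c hc
    have hmxeq : mx = mx' := le_antisymm (hmx'max mx hmxmem) (hmxmax mx' hmx'mem)
    have hmlen : (0:Int) < (cores.length : Int) := by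
      have := List.length_pos_of_mem hmxmem
      exact_mod_cast this
    have htarget : (1:Int) ≤ n - (cores.length : Int) := by omega
    have hmx1 : (1:Int) ≤ mx := h1 mx hmxmem
    have hhi : n - (cores.length : Int) ≤
        doneA cores (PySem.Int.floordiv (mx * (n - (cores.length : Int))) (cores.length : Int)) := by
      rw [hmxeq]
      exact hsum
    have hhi0 : (0:Int) ≤ PySem.Int.floordiv (mx * (n - (cores.length : Int))) (cores.length : Int) :=
      (PySem.Int.le_floordiv_iff_mul_le (by omega)).mpr (by nlinarith)
    -- the minimal completion time T
    have hex : ∃ u : Nat, n - (cores.length : Int) ≤ doneA cores (u : Int) :=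
      ⟨(PySem.Int.floordiv (mx * (n - (cores.length : Int))) (cores.length : Int)).toNat,
        by rwa [Int.toNat_of_nonneg hhi0]⟩
    set T : Int := ((Nat.find hex : Nat) : Int) with hTdef
    have hT : n - (cores.length : Int) ≤ doneA cores T := Nat.find_spec hex
    have hTmin : ∀ u, u < T → doneA cores u < n - (cores.length : Int) := by
      intro u hu
      by_cases hu0 : u < 0
      · have := doneA_nonpos cores h1 (le_of_lt hu0)
        omega
      · push_neg at hu0
        have h2 : u.toNat < Nat.find hex := by omega
        have h3 := Nat.find_min hex h2
        rw [Int.toNat_of_nonneg hu0] at h3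
        omega
    -- A's binary search lands on T
    have hlo : PySem.Int.floordiv (mn * (n - (cores.length : Int))) (cores.length : Int) ≤ T := by
      by_contra hc
      push_neg at hc
      have hmono := doneA_mono cores h1 (show T ≤
        PySem.Int.floordiv (mn * (n - (cores.length : Int))) (cores.length : Int) - 1 by omega)
      have := doneA_lo_pred cores (n - (cores.length : Int)) mn h1 hmnmem hmnmin htarget
      omega
    have hhiT : T ≤ PySem.Int.floordiv (mx * (n - (cores.length : Int))) (cores.length : Int) := by
      by_contra hc
      push_neg at hc
      have := hTmin _ hc
      omega
    have hbs := bsearchA_eq cores (n - (cores.length : Int)) T h1 hT hTmin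
      (PySem.Int.floordiv (mn * (n - (cores.length : Int))) (cores.length : Int))
      (PySem.Int.floordiv (mx * (n - (cores.length : Int))) (cores.length : Int))
      0 hlo (Or.inl hhiT)
    -- A's final scan picks the residual rank among the cores finishing at T
    have hTm1 : doneA cores (T - 1) < n - (cores.length : Int) := hTmin (T - 1) (by omega)
    have hstep := doneA_step T cores h1 1
    have hscan := scanA_eq T cores 1
      (n - (cores.length : Int) - doneA cores (T - 1)) (by omega) (by omega)
    -- B's quickselect reaches a threshold-derived skip state; then the merge pops
    have hcm : ∀ i, (hi : i < cores.length) → 1 ≤ cores.getD i 0 := by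
      intro i hi
      have : cores.getD i 0 ∈ cores := by
        rw [List.getD_eq_getElem _ _ hi]; exact List.getElem_mem hi
      exact h1 _ this
    have hυge : n - (cores.length : Int) ≤ doneA cores (mx * (n - (cores.length : Int))) :=
      doneA_U cores (n - (cores.length : Int)) mx h1 hmxmem htarget
    have hskip0 : cores.map (fun _ => (0:Int)) = cores.map (fun c => PySem.Int.floordiv 0 c) :=
      List.map_congr_left (fun c hc => by
        rw [PySem.Int.floordiv_eq_ediv_of_pos (by have := h1 c hc; omega)]
        simp)
    have hdone0 : doneA cores 0 < n - (cores.length : Int) :=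
      lt_of_le_of_lt (doneA_nonpos cores h1 le_rfl) (by omega)
    obtain ⟨t, hsel, ht0, htk⟩ := selectB_inv cores (n - (cores.length : Int)) hne h1
      ((sumDivB cores (mx * (n - (cores.length : Int)))).toNat + 1)
      (cores.map (fun _ => (0:Int)))
      (cores.map (fun c => PySem.Int.floordiv (mx * (n - (cores.length : Int))) c))
      0 (mx * (n - (cores.length : Int))) hskip0 rfl le_rfl (by nlinarith) hdone0 hυge
    have hsum_t : (cores.map (fun c => PySem.Int.floordiv t c)).sum = doneA cores t := rfl
    have hlenB : (List.zipWith (fun c s => c * (s + 1)) cores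
        (cores.map (fun c => PySem.Int.floordiv t c))).length = cores.length := by
      simp [List.length_zipWith]
    have hgetB : ∀ i, i < cores.length →
        (List.zipWith (fun c s => c * (s + 1)) cores
          (cores.map (fun c => PySem.Int.floordiv t c))).getD i 0 =
        cores.getD i 0 * (PySem.Int.floordiv t (cores.getD i 0) + 1) := by
      intro i hi
      rw [getD_zipWith _ _ _ _ hi (by simpa using hi), getD_map_div _ _ _ hi]
    have hq0 : ∀ i, i < cores.length → 0 ≤ PySem.Int.floordiv t (cores.getD i 0) := by
      intro i hi
      exact (PySem.Int.le_floordiv_iff_mul_le (by have := hcm i hi; omega)).mpr (by simpa using ht0)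
    have hdvdB : ∀ i, i < cores.length →
        cores.getD i 0 ∣ (List.zipWith (fun c s => c * (s + 1)) cores
          (cores.map (fun c => PySem.Int.floordiv t c))).getD i 0 ∧
        cores.getD i 0 ≤ (List.zipWith (fun c s => c * (s + 1)) cores
          (cores.map (fun c => PySem.Int.floordiv t c))).getD i 0 := by
      intro i hi
      rw [hgetB i hi]
      refine ⟨Dvd.intro _ rfl, ?_⟩
      have hc := hcm i hi
      have hq := hq0 i hi
      nlinarith
    have hclosB : ∀ i, i < cores.length → ∀ j, j < cores.length →
        cores.getD i 0 ≤ (List.zipWith (fun c s => c * (s + 1)) cores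
          (cores.map (fun c => PySem.Int.floordiv t c))).getD i 0 - cores.getD i 0 →
        ((List.zipWith (fun c s => c * (s + 1)) cores
            (cores.map (fun c => PySem.Int.floordiv t c))).getD i 0 - cores.getD i 0 <
          (List.zipWith (fun c s => c * (s + 1)) cores
            (cores.map (fun c => PySem.Int.floordiv t c))).getD j 0 ∨
         ((List.zipWith (fun c s => c * (s + 1)) cores
            (cores.map (fun c => PySem.Int.floordiv t c))).getD i 0 - cores.getD i 0 =
          (List.zipWith (fun c s => c * (s + 1)) cores
            (cores.map (fun c => PySem.Int.floordiv t c))).getD j 0 ∧ i < j)) := by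
      intro i hi j hj _
      left
      rw [hgetB i hi, hgetB j hj]
      have hci := hcm i hi
      have hcj := hcm j hj
      have hle1 : PySem.Int.floordiv t (cores.getD i 0) * cores.getD i 0 ≤ t :=
        (PySem.Int.le_floordiv_iff_mul_le (by omega)).mp le_rfl
      have hgt1 : t < (PySem.Int.floordiv t (cores.getD j 0) + 1) * cores.getD j 0 :=
        (PySem.Int.floordiv_lt_iff_lt_mul (by omega)).mp (by omega)
      nlinarith
    have hsumB : (∑ i ∈ Finset.range cores.length,
        PySem.Int.floordiv ((List.zipWith (fun c s => c * (s + 1)) cores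
          (cores.map (fun c => PySem.Int.floordiv t c))).getD i 0) (cores.getD i 0)) =
        doneA cores t + cores.length := by
      have hpt : ∀ i ∈ Finset.range cores.length,
          PySem.Int.floordiv ((List.zipWith (fun c s => c * (s + 1)) cores
            (cores.map (fun c => PySem.Int.floordiv t c))).getD i 0) (cores.getD i 0) =
          PySem.Int.floordiv t (cores.getD i 0) + 1 := by
        intro i hi
        have hi' := Finset.mem_range.mp hi
        have hc := hcm i hi'
        rw [hgetB i hi', mul_comm, PySem.Int.floordiv_eq_ediv_of_pos (by omega),
          Int.mul_ediv_cancel _ (by omega)]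
      rw [Finset.sum_congr rfl hpt, Finset.sum_add_distrib]
      simp only [Finset.sum_const, Finset.card_range, nsmul_eq_mul, mul_one]
      rw [doneA_range]
    have hmerge := mergeB_eq cores h1 hne (n - (cores.length : Int)) T hT hTmin
      (n - (cores.length : Int) - doneA cores t - 1).toNat
      (List.zipWith (fun c s => c * (s + 1)) cores
        (cores.map (fun c => PySem.Int.floordiv t c)))
      hlenB hdvdB hclosB
      (by
        rw [hsumB, Int.toNat_of_nonneg (by omega)]
        ring)
    rw [show ((n - (cores.length : Int) - doneA cores t - 1).toNat : Int) + 1 =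
        n - (cores.length : Int) - doneA cores t from by
      rw [Int.toNat_of_nonneg (by omega)]; ring] at hmerge
    -- assemble
    unfold solution solution_alt
    simp only [hmin, hmax, if_neg hnm]
    rw [hbs, hscan, hsel, hsum_t]
    exact hmerge.symm
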